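-- pv_equiv track=rewrite | github.com/RemorI/Advent-Code-2024 | daily-code/day02/day-2.py | count_reports
-- ===== SOURCE A (Python) =====
-- def count_reports(reports: list[int]) -> bool:
--     if not all(1 <= c <= 3 for c in [abs(x1 - x2) for x1, x2 in zip(reports, reports[1:])]):
--         return False
--     if all(x1 < x2 for x1, x2 in zip(reports, reports[1:])):
--         return True
--     if all(x1 > x2 for x1, x2 in zip(reports, reports[1:])):
--         return True
--     return False
-- ===== SOURCE B (Python) =====
-- def count_reports(reports: list[int]) -> bool:
--     diffs = [b - a for a, b in zip(reports, reports[1:])]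
--     if any(not (1 <= abs(d) <= 3) for d in diffs):
--         return False
--     return reports == sorted(reports) or reports == sorted(reports, reverse=True)
-- ===== Notes on version B (the rewrite author's own statement) =====
-- stated objective: idiomatic
-- what changed: B checks the step sizes on adjacent differences once, then decides monotonicity by comparing the list with its sorted (and reverse-sorted) copy instead of A's two extra strict-comparison scans.
import Mathlib
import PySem

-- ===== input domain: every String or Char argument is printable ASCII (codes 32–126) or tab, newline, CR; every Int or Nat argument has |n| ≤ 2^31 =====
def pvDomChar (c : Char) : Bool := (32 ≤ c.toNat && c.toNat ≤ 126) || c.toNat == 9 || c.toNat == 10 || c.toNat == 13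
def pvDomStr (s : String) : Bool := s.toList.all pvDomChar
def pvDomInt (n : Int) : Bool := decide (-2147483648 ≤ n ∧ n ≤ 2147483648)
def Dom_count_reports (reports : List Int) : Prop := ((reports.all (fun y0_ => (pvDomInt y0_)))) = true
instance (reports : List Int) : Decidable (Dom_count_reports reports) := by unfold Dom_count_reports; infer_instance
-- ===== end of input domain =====

-- ===== PORT A =====
-- one honest line: B replaces A's two strict monotonicity scans by a step-size check on
-- adjacent differences followed by comparison with the sorted / reverse-sorted list.
def count_reports (reports : List Int) : Bool :=
  if !(((reports.zip (reports.drop 1)).map (fun p => |p.1 - p.2|)).all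
        (fun c => decide (1 ≤ c) && decide (c ≤ 3))) then false
  else if (reports.zip (reports.drop 1)).all (fun p => decide (p.1 < p.2)) then true
  else if (reports.zip (reports.drop 1)).all (fun p => decide (p.2 < p.1)) then true
  else false

-- ===== PORT B =====
def count_reports_alt (reports : List Int) : Bool :=
  let diffs := (reports.zip (reports.drop 1)).map (fun p => p.2 - p.1)
  if diffs.any (fun d => !(decide (1 ≤ |d|) && decide (|d| ≤ 3))) then false
  else decide (reports = PySem.List.sorted reports (fun x => x) false) ||
       decide (reports = PySem.List.sorted reports (fun x => x) true)

-- ===== PRECONDITION & SPEC =====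
def Spec_count_reports (reports : List Int) (out : Bool) : Prop := out = count_reports_alt reports
instance (reports : List Int) (out : Bool) : Decidable (Spec_count_reports reports out) := by unfold Spec_count_reports; infer_instance

-- ===== CLAIM (what is proved, stated in full; the proofs are below) =====
def Claim_equal_count_reports : Prop := ∀ (reports : List Int), Dom_count_reports reports → Spec_count_reports reports (count_reports reports)

-- ===== LEMMAS AND PROOFS =====

theorem zip_forall_iff_isChain {α : Type} (R : α → α → Prop) (xs : List α) :
    (∀ p ∈ xs.zip (xs.drop 1), R p.1 p.2) ↔ List.IsChain R xs := by
  induction xs with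
  | nil => simp [List.isChain_nil]
  | cons a t ih =>
    cases t with
    | nil => simp [List.isChain_singleton]
    | cons b u =>
      simp only [List.drop_one, List.tail_cons, List.zip_cons_cons,
        List.isChain_cons_cons, List.mem_cons, forall_eq_or_imp] at *
      exact and_congr Iff.rfl ih

theorem sorted_eq_iff_chain_le (xs : List Int) :
    xs = PySem.List.sorted xs (fun x => x) false ↔ List.IsChain (· ≤ ·) xs := by
  rw [List.isChain_iff_pairwise]
  constructor
  · intro h
    have hp := PySem.List.sorted_pairwise (xs := xs) (key := fun x => x)
    rw [← h] at hp
    exact hp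
  · intro h
    exact (PySem.List.sorted_eq_self_of_pairwise xs (fun x => x) h).symm

theorem sorted_rev_eq_iff_chain_ge (xs : List Int) :
    xs = PySem.List.sorted xs (fun x => x) true ↔ List.IsChain (fun a b : Int => b ≤ a) xs := by
  haveI : Trans (fun a b : Int => b ≤ a) (fun a b : Int => b ≤ a) (fun a b : Int => b ≤ a) :=
    ⟨fun h1 h2 => le_trans h2 h1⟩
  rw [List.isChain_iff_pairwise]
  constructor
  · intro h
    have hp := PySem.List.sorted_pairwise_rev (xs := xs) (key := fun x => x)
    rw [← h] at hp
    exact hp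
  · intro h
    exact (PySem.List.sorted_rev_eq_self_of_pairwise xs (fun x => x) h).symm

-- ===== VERDICT (by name: the statement is the Claim_ definition above) =====
theorem count_reports_spec : Claim_equal_count_reports := by
  intro reports _
  show count_reports reports = count_reports_alt reports
  simp only [count_reports, count_reports_alt]
  by_cases hstep : ∀ p ∈ reports.zip (reports.drop 1), 1 ≤ |p.1 - p.2| ∧ |p.1 - p.2| ≤ 3
  · have hA : (!(((reports.zip (reports.drop 1)).map (fun p => |p.1 - p.2|)).all
        (fun c => decide (1 ≤ c) && decide (c ≤ 3)))) = false := by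
      simp only [Bool.not_eq_false', List.all_eq_true]
      intro c hcmem
      obtain ⟨p, hp, rfl⟩ := List.mem_map.mp hcmem
      have h := hstep p hp
      simp [h.1, h.2]
    have hB : (((reports.zip (reports.drop 1)).map (fun p => p.2 - p.1)).any
        (fun d => !(decide (1 ≤ |d|) && decide (|d| ≤ 3)))) = false := by
      simp only [List.any_eq_false]
      intro d hdmem
      obtain ⟨p, hp, rfl⟩ := List.mem_map.mp hdmem
      have h := hstep p hp
      rw [abs_sub_comm] at h
      simp [h.1, h.2]
    rw [hA, hB]
    simp only [Bool.false_eq_true, if_false]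
    have hne : ∀ p ∈ reports.zip (reports.drop 1), (p.1 : Int) ≠ p.2 := by
      intro p hp h
      have h1 := (hstep p hp).1
      rw [h] at h1; simp at h1
    have h1 : (reports = PySem.List.sorted reports (fun x => x) false) ↔
        (∀ p ∈ reports.zip (reports.drop 1), p.1 < p.2) := by
      rw [sorted_eq_iff_chain_le, ← zip_forall_iff_isChain]
      exact ⟨fun h p hp => lt_of_le_of_ne (h p hp) (hne p hp),
             fun h p hp => le_of_lt (h p hp)⟩
    have h2 : (reports = PySem.List.sorted reports (fun x => x) true) ↔
        (∀ p ∈ reports.zip (reports.drop 1), p.2 < p.1) := by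
      rw [sorted_rev_eq_iff_chain_ge, ← zip_forall_iff_isChain]
      exact ⟨fun h p hp => lt_of_le_of_ne (h p hp) (fun hq => hne p hp hq.symm),
             fun h p hp => le_of_lt (h p hp)⟩
    by_cases hinc : ∀ p ∈ reports.zip (reports.drop 1), (p.1 : Int) < p.2
    · have : (reports.zip (reports.drop 1)).all (fun p => decide (p.1 < p.2)) = true := by
        simp only [List.all_eq_true, decide_eq_true_eq]; exact hinc
      rw [this, decide_eq_true (h1.mpr hinc)]
      simp
    · have hi : (reports.zip (reports.drop 1)).all (fun p => decide (p.1 < p.2)) = false := by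
        simp only [List.all_eq_false]
        push_neg at hinc
        obtain ⟨p, hp, hc⟩ := hinc
        exact ⟨p, hp, by simpa using hc⟩
      rw [hi]
      by_cases hdec : ∀ p ∈ reports.zip (reports.drop 1), (p.2 : Int) < p.1
      · have : (reports.zip (reports.drop 1)).all (fun p => decide (p.2 < p.1)) = true := by
          simp only [List.all_eq_true, decide_eq_true_eq]; exact hdec
        rw [this, decide_eq_true (h2.mpr hdec)]
        simp
      · have hd : (reports.zip (reports.drop 1)).all (fun p => decide (p.2 < p.1)) = false := by
          simp only [List.all_eq_false]
          push_neg at hdec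
          obtain ⟨p, hp, hc⟩ := hdec
          exact ⟨p, hp, by simpa using hc⟩
        rw [hd, decide_eq_false (fun h => hinc (h1.mp h)),
          decide_eq_false (fun h => hdec (h2.mp h))]
        simp
  · have hA : (!(((reports.zip (reports.drop 1)).map (fun p => |p.1 - p.2|)).all
        (fun c => decide (1 ≤ c) && decide (c ≤ 3)))) = true := by
      push_neg at hstep
      obtain ⟨p, hp, hc⟩ := hstep
      simp only [Bool.not_eq_true', List.all_eq_false]
      refine ⟨|p.1 - p.2|, List.mem_map_of_mem hp, ?_⟩
      by_cases h1 : (1 : Int) ≤ |p.1 - p.2|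
      · simp [not_le.mpr (hc h1)]
      · simp [h1]
    have hB : (((reports.zip (reports.drop 1)).map (fun p => p.2 - p.1)).any
        (fun d => !(decide (1 ≤ |d|) && decide (|d| ≤ 3)))) = true := by
      push_neg at hstep
      obtain ⟨p, hp, hc⟩ := hstep
      simp only [List.any_eq_true]
      refine ⟨p.2 - p.1, List.mem_map_of_mem hp, ?_⟩
      rw [abs_sub_comm] at hc
      by_cases h1 : (1 : Int) ≤ |p.2 - p.1|
      · simp [h1, not_le.mpr (hc h1)]
      · simp [h1]
    rw [hA, hB]
    simp
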